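-- pv_equiv track=rewrite | github.com/cforth/toys | combinations/permutations_generater.py | permutations_generater
-- ===== SOURCE A (Python) =====
-- def permutations_generater(elements, length):
--     result = [None for n in range(length)]
--     base = len(elements)
--     for num in range(base ** length):
--         choose = True
--         temp_set = set()
--         for index in range(length):
--             result[length-index-1] = elements[num % base]
--             num = num // base
--         for n in result:
--             if n not in temp_set:
--                 temp_set.add(n)
--             else:
--                 choose = False
--         if choose:
--             yield result
-- ===== SOURCE B (Python) =====
-- def permutations_generater(elements, length):
--     """Yield each length-tuple over elements whose values are all distinct,
--     in index-lexicographic order.  The internal buffer is reused between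
--     yields (no per-tuple allocation); consumers that need to keep a tuple
--     should copy it."""
--     base = len(elements)
--     if length > 0 and base == 0:
--         return
--     idx = [0] * length
--     result = [0] * length
--     while True:
--         for i in range(length):
--             result[i] = elements[idx[i]]
--         if len(set(result)) == length:
--             yield result
--         i = length - 1
--         while i >= 0 and idx[i] == base - 1:
--             idx[i] = 0
--             i -= 1
--         if i < 0:
--             return
--         idx[i] += 1
-- ===== Notes on version B (the rewrite author's own statement) =====
-- stated objective: alternative
-- what changed: A enumerates tuples by counting an integer over range(base**length) and re-decoding every counter value with divmod into a scratch list it filters with a flag-and-set scan, while B keeps an explicit index odometer it increments in place with carry and tests distinctness by len(set(result)) == length; both are generators yielding a reused buffer, so their materialized outputs coincide.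
import Mathlib
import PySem

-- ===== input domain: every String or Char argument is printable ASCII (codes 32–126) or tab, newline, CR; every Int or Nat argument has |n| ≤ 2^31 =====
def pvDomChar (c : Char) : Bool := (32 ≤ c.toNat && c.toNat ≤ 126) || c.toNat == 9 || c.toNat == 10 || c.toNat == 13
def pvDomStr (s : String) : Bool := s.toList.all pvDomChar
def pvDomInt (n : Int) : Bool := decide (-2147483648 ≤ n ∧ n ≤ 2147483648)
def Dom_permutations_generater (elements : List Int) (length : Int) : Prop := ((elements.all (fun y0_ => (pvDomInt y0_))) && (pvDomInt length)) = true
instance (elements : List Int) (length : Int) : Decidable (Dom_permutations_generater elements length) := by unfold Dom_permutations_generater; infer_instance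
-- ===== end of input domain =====

-- B enumerates the same tuples with an explicit odometer (index vector incremented with
-- carry) instead of re-decoding every counter value from an integer (objective: alternative).
-- NOTE: both Pythons are generators that yield a buffer they keep mutating, so the value a
-- consumer materializes (list(...)) is N references to the buffer's final state; both ports
-- model exactly that materialized value.

-- ===== PORT A =====
-- inner loop 'for index in range(length): result[length-index-1] = elements[num % base]; num = num // base'
-- (length-index-1 is always in [0, length), so the List.set index is exact; the
-- pyGetD default is never used: 0 ≤ num % base < base = len(elements) whenever executed)
def pvInnerA (elements : List Int) (length : Int) (st : List Int × Int) (index : Int) : List Int × Int :=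
  (st.1.set (length - index - 1).toNat
      (PySem.List.pyGetD elements (PySem.Int.mod st.2 (elements.length : Int)) 0),
   PySem.Int.floordiv st.2 (elements.length : Int))

-- 'for n in result: if n not in temp_set: temp_set.add(n) else: choose = False'
def pvChooseA (st : PySem.Set Int × Bool) (n : Int) : PySem.Set Int × Bool :=
  if !(st.1.contains n) then (st.1.add n, st.2) else (st.1, false)

-- one iteration of 'for num in range(base ** length)'; the Nat component counts the yields
def pvStepA (elements : List Int) (length : Int) (st : List Int × Nat) (num : Int) : List Int × Nat :=
  let r := (PySem.List.pyRange 0 length 1).foldl (pvInnerA elements length) (st.1, num)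
  let choose := (r.1.foldl pvChooseA (PySem.Set.empty, true)).2
  (r.1, if choose then st.2 + 1 else st.2)

-- 'result = [None]*length': the None placeholders are never read (for length ≥ 1 the inner
-- loop overwrites every slot before 'for n in result'; for length = 0 result is empty),
-- so the port carries a List Int initialized with 0.  'base ** length' raises for
-- length < 0 (excluded by Pre_), so the exponent is length.toNat.  The generator's
-- cnt yields of the shared list materialize as replicate cnt (final result).
def permutations_generater (elements : List Int) (length : Int) : List (List Int) :=
  let st := (PySem.List.pyRange 0 ((elements.length : Int) ^ length.toNat) 1).foldl
              (pvStepA elements length) (List.replicate length.toNat 0, 0)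
  List.replicate st.2 st.1

-- ===== PORT B =====
-- 'for i in range(length): result[i] = elements[idx[i]]'
def pvFillB (elements : List Int) (idx : List Int) (r : List Int) (i : Int) : List Int :=
  r.set i.toNat (PySem.List.pyGetD elements (PySem.List.pyGetD idx i 0) 0)

-- 'i = length - 1; while i >= 0 and idx[i] == base - 1: idx[i] = 0; i -= 1'
-- (the Nat argument is i + 1, so 0 denotes the exit with i < 0)
def pvCarryB (b : Int) : List Int → Nat → List Int × Int
  | idx, 0 => (idx, -1)
  | idx, n + 1 =>
      if PySem.List.pyGetD idx (n : Int) 0 = b - 1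
      then pvCarryB b (idx.set n 0) n
      else (idx, (n : Int))

-- the 'while True' loop; fuel = base ** length bounds the iteration count exactly
def pvLoopB (elements : List Int) (length : Int) (b : Int) :
    Nat → List Int → List Int → Nat → List Int × Nat
  | 0, _, result, cnt => (result, cnt)
  | fuel + 1, idx, result, cnt =>
      let result := (PySem.List.pyRange 0 length 1).foldl (pvFillB elements idx) result
      let cnt := if ((PySem.Set.ofList result).length : Int) = length then cnt + 1 else cnt
      let c := pvCarryB b idx length.toNat
      if c.2 < 0 then (result, cnt)
      else pvLoopB elements length b fuel (c.1.set c.2.toNat (PySem.List.pyGetD c.1 c.2 0 + 1)) result cnt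

-- the generator materializes as cnt references to the final state of the shared buffer
def permutations_generater_alt (elements : List Int) (length : Int) : List (List Int) :=
  if 0 < length ∧ elements.length = 0 then []
  else
    let st := pvLoopB elements length (elements.length : Int) (elements.length ^ length.toNat)
                (List.replicate length.toNat 0) (List.replicate length.toNat 0) 0
    List.replicate st.2 st.1

-- ===== PRECONDITION & SPEC =====
-- Pre_ excludes length < 0, where Python A raises (base ** length is a float, so
-- range(...) raises TypeError; for base = 0 a ZeroDivisionError).
def Pre_permutations_generater (elements : List Int) (length : Int) : Prop := 0 ≤ length
instance (elements : List Int) (length : Int) : Decidable (Pre_permutations_generater elements length) := by unfold Pre_permutations_generater; infer_instance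

def pvWitness_permutations_generater : List Int × Int := ([1, 2, 3], 2)

def Spec_permutations_generater (elements : List Int) (length : Int) (out : List (List Int)) : Prop := out = permutations_generater_alt elements length
instance (elements : List Int) (length : Int) (out : List (List Int)) : Decidable (Spec_permutations_generater elements length out) := by unfold Spec_permutations_generater; infer_instance

-- ===== CLAIM (what is proved, stated in full; the proofs are below) =====
def Claim_equal_permutations_generater : Prop := ∀ (elements : List Int) (length : Int), Dom_permutations_generater elements length → Pre_permutations_generater elements length → Spec_permutations_generater elements length (permutations_generater elements length)
-- ===== LEMMAS AND PROOFS =====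

-- the k-th tuple in A's/B's shared order: big-endian base-b decoding mapped through elements
def pvVals (elements : List Int) : Nat → Nat → List Int
  | 0, _ => []
  | k + 1, m => pvVals elements k (m / elements.length) ++ [elements.getD (m % elements.length) 0]

theorem pvVals_cons (elements : List Int) (k : Nat) : ∀ m,
    pvVals elements (k + 1) m
      = elements.getD ((m / elements.length ^ k) % elements.length) 0 :: pvVals elements k m := by
  induction k with
  | zero => intro m; simp [pvVals]
  | succ k ih =>
      intro m
      show pvVals elements (k+1) (m / elements.length) ++ _ = _
      rw [ih, Nat.div_div_eq_div_mul, mul_comm (elements.length) (elements.length ^ k), ← pow_succ]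
      rfl

theorem pvVals_length (elements : List Int) (k : Nat) : ∀ (m : Nat), (pvVals elements k m).length = k := by
  induction k with
  | zero => intro m; rfl
  | succ k ih => intro m; simp [pvVals, ih]

theorem pvChoose_spec : ∀ (t : List Int) (s : PySem.Set Int) (c : Bool),
    (t.foldl pvChooseA (s, c)).2 = (c && decide (t.Nodup ∧ ∀ x ∈ t, x ∉ s)) := by
  intro t
  induction t with
  | nil => intro s c; simp
  | cons n t ih =>
      intro s c
      by_cases hn : n ∈ s
      · have hc : PySem.Set.contains s n = true := (PySem.Set.contains_iff s n).2 hn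
        rw [List.foldl_cons]
        simp only [pvChooseA, hc, Bool.not_true, Bool.false_eq_true, if_false]
        rw [ih]
        simp [hn]
      · have hc : PySem.Set.contains s n = false := by
          rcases Bool.eq_false_or_eq_true (PySem.Set.contains s n) with h | h
          · exact absurd ((PySem.Set.contains_iff s n).1 h) hn
          · exact h
        rw [List.foldl_cons]
        simp only [pvChooseA, hc, Bool.not_false, if_true]
        rw [ih]
        congr 1
        apply decide_eq_decide.2
        simp only [List.nodup_cons, List.forall_mem_cons, PySem.Set.mem_add]
        constructor
        · rintro ⟨hnd, hall⟩
          exact ⟨⟨fun hnt => (hall n hnt) (Or.inr rfl), hnd⟩, hn,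
            fun x hx h => (hall x hx) (Or.inl h)⟩
        · rintro ⟨⟨hnt, hnd⟩, _, hall⟩
          exact ⟨hnd, fun x hx h => h.elim (hall x hx) (fun he => hnt (he ▸ hx))⟩

theorem pvTakeSet {α : Type} (l : List α) (j : Nat) (x : α) (h : j < l.length) :
    (l.take (j + 1)).set j x = l.take j ++ [x] := by
  rw [List.take_add_one, List.getElem?_eq_getElem h]
  have hl : (l.take j).length = j := List.length_take_of_le (by omega)
  rw [List.set_append]
  simp [hl]

theorem pvInner_spec (elements : List Int) (L : Nat)
    (k : Nat) (hk : k ≤ L) (res : List Int) (hres : res.length = L) (m : Nat) :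
    ((List.range k).map (fun (i : Nat) => (i : Int))).foldl (pvInnerA elements (L : Int)) (res, (m : Int))
      = (res.take (L - k) ++ pvVals elements k m, ((m / elements.length ^ k : Nat) : Int)) := by
  induction k generalizing m with
  | zero =>
      simp [pvVals, List.take_of_length_le (le_of_eq hres)]
  | succ k ih =>
      rw [List.range_succ, List.map_append, List.foldl_append, ih (by omega)]
      simp only [List.map_cons, List.map_nil, List.foldl_cons, List.foldl_nil]
      unfold pvInnerA
      simp only [PySem.Int.mod_natCast, PySem.Int.floordiv_natCast, PySem.List.pyGetD_natCast]
      have hcast : ((L : Int) - (k : Int) - 1).toNat = L - k - 1 := by omega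
      rw [hcast]
      have hlen : (res.take (L - k)).length = L - k := List.length_take_of_le (by omega)
      have hsucc : L - k = (L - k - 1) + 1 := by omega
      refine Prod.ext_iff.2 ⟨?_, ?_⟩
      · show (res.take (L - k) ++ pvVals elements k m).set (L - k - 1) _ = _
        rw [List.set_append, if_pos (by omega)]
        rw [hsucc]
        simp only [Nat.add_sub_cancel]
        rw [pvTakeSet res (L - k - 1) _ (by omega)]
        rw [pvVals_cons]
        simp only [List.append_assoc, List.singleton_append]
        congr 2
      · show ((m / elements.length ^ k / elements.length : Nat) : Int) = _
        rw [Nat.div_div_eq_div_mul, ← pow_succ]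

theorem pvStep_spec (elements : List Int) (L : Nat)
    (res : List Int) (hres : res.length = L) (cnt : Nat) (m : Nat) :
    pvStepA elements (L : Int) (res, cnt) (m : Int)
      = (pvVals elements L m, cnt + if (pvVals elements L m).Nodup then 1 else 0) := by
  unfold pvStepA
  rw [PySem.List.pyRange_zero_natCast, pvInner_spec elements L L (le_refl L) res hres m]
  simp only [Nat.sub_self, List.take_zero, List.nil_append]
  rw [pvChoose_spec]
  by_cases hnd : (pvVals elements L m).Nodup <;> simp [hnd, PySem.Set.empty]

theorem pvOuter_spec (elements : List Int) (L : Nat) :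
    ∀ (ms : List Nat) (res : List Int), res.length = L → ∀ (cnt : Nat),
    (ms.map (fun (m : Nat) => (m : Int))).foldl (pvStepA elements (L : Int)) (res, cnt)
      = ((ms.map (pvVals elements L)).getLastD res,
         cnt + ms.countP (fun m => decide (pvVals elements L m).Nodup)) := by
  intro ms
  induction ms with
  | nil => intro res hres cnt; simp
  | cons m ms ih =>
      intro res hres cnt
      rw [List.map_cons, List.foldl_cons, pvStep_spec elements L res hres cnt m,
        ih (pvVals elements L m) (pvVals_length elements L m)]
      simp only [List.map_cons, List.countP_cons]
      refine Prod.ext_iff.2 ⟨?_, ?_⟩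
      · dsimp only
        cases ms with
        | nil => simp
        | cons a l => rw [List.getLastD_cons]
      · dsimp only
        by_cases hnd : (pvVals elements L m).Nodup <;> simp [hnd] <;> omega

-- ===== B-side lemmas =====

-- the big-endian digit vector of k in base b, length L (B's odometer state at step k)
def pvDigitsI (b : Nat) : Nat → Nat → List Int
  | 0, _ => []
  | L + 1, m => pvDigitsI b L (m / b) ++ [((m % b : Nat) : Int)]

theorem pvDigitsI_length (b : Nat) : ∀ L m, (pvDigitsI b L m).length = L := by
  intro L
  induction L with
  | zero => intro m; rfl
  | succ L ih => intro m; simp [pvDigitsI, ih]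

theorem pvDigitsI_zero (b : Nat) : ∀ L, pvDigitsI b L 0 = List.replicate L 0 := by
  intro L
  induction L with
  | zero => rfl
  | succ L ih => simp [pvDigitsI, Nat.zero_div, Nat.zero_mod, ih, List.replicate_succ']

theorem pvCarryB_append (b : Int) : ∀ (n : Nat) (idx t : List Int), n ≤ idx.length →
    pvCarryB b (idx ++ t) n = ((pvCarryB b idx n).1 ++ t, (pvCarryB b idx n).2) := by
  intro n
  induction n with
  | zero => intro idx t _; rfl
  | succ n ih =>
      intro idx t hn
      have hget : PySem.List.pyGetD (idx ++ t) (n : Int) 0 = PySem.List.pyGetD idx (n : Int) 0 := by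
        rw [PySem.List.pyGetD_natCast, PySem.List.pyGetD_natCast, List.getD_append _ _ _ _ (by omega)]
      show pvCarryB b (idx ++ t) (n+1) = _
      unfold pvCarryB
      rw [hget]
      by_cases hx : PySem.List.pyGetD idx (n : Int) 0 = b - 1
      · rw [if_pos hx, if_pos hx]
        have hset : (idx ++ t).set n 0 = idx.set n 0 ++ t := by
          rw [List.set_append, if_pos (by omega)]
        rw [hset, ih (idx.set n 0) t (by simp; omega)]
      · rw [if_neg hx, if_neg hx]

theorem pvCarryB_length (b : Int) : ∀ (n : Nat) (idx : List Int),
    (pvCarryB b idx n).1.length = idx.length := by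
  intro n
  induction n with
  | zero => intro idx; rfl
  | succ n ih =>
      intro idx
      show (pvCarryB b idx (n+1)).1.length = _
      unfold pvCarryB
      by_cases hx : PySem.List.pyGetD idx (n : Int) 0 = b - 1
      · rw [if_pos hx]
        rw [ih (idx.set n 0)]
        simp
      · rw [if_neg hx]

theorem pvCarry_spec (b : Nat) (hb : 0 < b) : ∀ L k, k < b ^ L →
    (k + 1 = b ^ L → pvCarryB (b : Int) (pvDigitsI b L k) L = (List.replicate L 0, -1)) ∧
    (k + 1 < b ^ L → ∃ (d' : List Int) (i : Nat), pvCarryB (b : Int) (pvDigitsI b L k) L = (d', (i : Int)) ∧ i < L ∧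
        d'.set i (PySem.List.pyGetD d' (i : Int) 0 + 1) = pvDigitsI b L (k + 1)) := by
  intro L
  induction L with
  | zero =>
      intro k hk
      refine ⟨fun _ => rfl, fun h => ?_⟩
      simp only [pow_zero] at hk h
      omega
  | succ L ih =>
      intro k hk
      have hmod : k % b < b := Nat.mod_lt k hb
      have hdm := Nat.div_add_mod k b
      have hdlen : (pvDigitsI b L (k / b)).length = L := pvDigitsI_length b L (k / b)
      have hk' : k / b < b ^ L := Nat.div_lt_of_lt_mul (by rw [mul_comm, ← pow_succ]; exact hk)
      have hdig : pvDigitsI b (L + 1) k = pvDigitsI b L (k / b) ++ [((k % b : Nat) : Int)] := rfl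
      have hgetlast : PySem.List.pyGetD (pvDigitsI b L (k / b) ++ [((k % b : Nat) : Int)]) (L : Int) 0
          = ((k % b : Nat) : Int) := by
        rw [PySem.List.pyGetD_natCast]
        rw [List.getD_eq_getElem _ _ (by simp [hdlen]),
          List.getElem_append_right (by omega)]
        simp [hdlen]
      by_cases hx : k % b = b - 1
      · -- trailing digit is b-1: it is zeroed and the carry moves left
        have hxI : ((k % b : Nat) : Int) = (b : Int) - 1 := by
          push_cast; omega
        have hset0 : (pvDigitsI b L (k / b) ++ [((k % b : Nat) : Int)]).set L 0
            = pvDigitsI b L (k / b) ++ [(0 : Int)] := by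
          rw [List.set_append, if_neg (by omega)]
          simp [hdlen]
        have hstep : pvCarryB (b : Int) (pvDigitsI b (L + 1) k) (L + 1)
            = ((pvCarryB (b : Int) (pvDigitsI b L (k / b)) L).1 ++ [(0 : Int)],
               (pvCarryB (b : Int) (pvDigitsI b L (k / b)) L).2) := by
          rw [hdig]
          show (if PySem.List.pyGetD _ (L : Int) 0 = (b : Int) - 1 then _ else _) = _
          rw [hgetlast, if_pos hxI, hset0, pvCarryB_append _ _ _ _ (by omega)]
        have harith : k + 1 = b * (k / b + 1) := by
          rw [Nat.mul_add, Nat.mul_one]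
          omega
        constructor
        · intro h1
          have h1' : k / b + 1 = b ^ L := by
            have hbb : b * (k / b + 1) = b * b ^ L := by
              rw [← harith, h1]; ring
            exact Nat.eq_of_mul_eq_mul_left hb hbb
          rw [hstep, (ih (k / b) hk').1 h1']
          rw [← List.replicate_succ']
        · intro h2
          have h2' : k / b + 1 < b ^ L := by
            have : b * (k / b + 1) < b * b ^ L := by
              rw [← harith, mul_comm, ← pow_succ]
              exact h2
            exact Nat.lt_of_mul_lt_mul_left this
          obtain ⟨d', i, heq, hi, hsetd⟩ := (ih (k / b) hk').2 h2'
          have hd'len : d'.length = L := by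
            have := pvCarryB_length (b : Int) L (pvDigitsI b L (k / b))
            rw [heq] at this
            simpa [hdlen] using this
          refine ⟨d' ++ [(0 : Int)], i, ?_, by omega, ?_⟩
          · rw [hstep, heq]
          · have hget : PySem.List.pyGetD (d' ++ [(0 : Int)]) (i : Int) 0
                = PySem.List.pyGetD d' (i : Int) 0 := by
              rw [PySem.List.pyGetD_natCast, PySem.List.pyGetD_natCast,
                List.getD_append _ _ _ _ (by omega)]
            rw [hget, List.set_append, if_pos (by omega), hsetd]
            have hdiv : (k + 1) / b = k / b + 1 := by
              rw [harith, Nat.mul_div_cancel_left _ hb]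
            have hmod0 : (k + 1) % b = 0 := by
              rw [harith, Nat.mul_mod_right]
            show _ = pvDigitsI b L ((k + 1) / b) ++ [(((k + 1) % b : Nat) : Int)]
            rw [hdiv, hmod0]
            norm_num
      · -- trailing digit below b-1: it is simply incremented
        have hxlt : k % b < b - 1 := by omega
        have hxI : ¬ ((k % b : Nat) : Int) = (b : Int) - 1 := by
          push_cast; omega
        have hstep : pvCarryB (b : Int) (pvDigitsI b (L + 1) k) (L + 1)
            = (pvDigitsI b L (k / b) ++ [((k % b : Nat) : Int)], (L : Int)) := by
          rw [hdig]
          show (if PySem.List.pyGetD _ (L : Int) 0 = (b : Int) - 1 then _ else _) = _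
          rw [hgetlast, if_neg hxI]
        have hsplit : k + 1 = b * (k / b) + (k % b + 1) := by omega
        have hdiv : (k + 1) / b = k / b := by
          have h0 : (k % b + 1) / b = 0 := Nat.div_eq_of_lt (by omega)
          calc (k + 1) / b = (b * (k / b) + (k % b + 1)) / b := by rw [← hsplit]
            _ = k / b + (k % b + 1) / b := Nat.mul_add_div hb _ _
            _ = k / b := by rw [h0, Nat.add_zero]
        have hmod1 : (k + 1) % b = k % b + 1 := by
          calc (k + 1) % b = (b * (k / b) + (k % b + 1)) % b := by rw [← hsplit]
            _ = (k % b + 1) % b := Nat.mul_add_mod _ _ _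
            _ = k % b + 1 := Nat.mod_eq_of_lt (by omega)
        constructor
        · intro h1
          exfalso
          have : (k + 1) % b = 0 := by
            rw [h1, pow_succ, Nat.mul_mod_left]
          omega
        · intro _
          refine ⟨pvDigitsI b L (k / b) ++ [((k % b : Nat) : Int)], L, hstep, by omega, ?_⟩
          rw [hgetlast, List.set_append, if_neg (by omega)]
          simp only [hdlen, Nat.sub_self, List.set_cons_zero]
          show _ = pvDigitsI b L ((k + 1) / b) ++ [(((k + 1) % b : Nat) : Int)]
          rw [hdiv, hmod1]
          push_cast
          ring_nf

theorem pvFill_spec (elements : List Int) : ∀ (L : Nat) (k : Nat) (tail res : List Int),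
    L ≤ res.length →
    (PySem.List.pyRange 0 (L : Int) 1).foldl
        (pvFillB elements (pvDigitsI elements.length L k ++ tail)) res
      = pvVals elements L k ++ res.drop L := by
  intro L
  induction L with
  | zero =>
      intro k tail res _
      rw [PySem.List.pyRange_zero_natCast]
      simp [pvVals]
  | succ L ih =>
      intro k tail res h
      have hdig : pvDigitsI elements.length (L + 1) k ++ tail
          = pvDigitsI elements.length L (k / elements.length)
              ++ (((k % elements.length : Nat) : Int) :: tail) := by
        simp [pvDigitsI]
      rw [hdig, PySem.List.pyRange_zero_natCast, List.range_succ, List.map_append,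
        List.foldl_append, ← PySem.List.pyRange_zero_natCast,
        ih (k / elements.length) _ res (by omega)]
      simp only [List.map_cons, List.map_nil, List.foldl_cons, List.foldl_nil]
      unfold pvFillB
      have hdlen : (pvDigitsI elements.length L (k / elements.length)).length = L :=
        pvDigitsI_length _ _ _
      have hidx : PySem.List.pyGetD
          (pvDigitsI elements.length L (k / elements.length)
            ++ (((k % elements.length : Nat) : Int) :: tail)) (L : Int) 0
          = ((k % elements.length : Nat) : Int) := by
        rw [PySem.List.pyGetD_natCast, List.getD_eq_getElem _ _ (by simp [hdlen]),
          List.getElem_append_right (by omega)]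
        simp [hdlen]
      rw [hidx, PySem.List.pyGetD_natCast, Int.toNat_natCast, List.set_append,
        if_neg (by rw [pvVals_length]; omega), pvVals_length,
        Nat.sub_self, List.drop_eq_getElem_cons (by omega), List.set_cons_zero]
      show _ = pvVals elements L (k / elements.length)
          ++ [elements.getD (k % elements.length) 0] ++ res.drop (L + 1)
      simp

theorem pvOfList_len_iff (t : List Int) :
    ((PySem.Set.ofList t).length = t.length) ↔ t.Nodup := by
  constructor
  · intro h
    have hfs : (PySem.Set.ofList t).toFinset = t.toFinset := by
      apply Finset.ext
      intro x
      simp [List.mem_toFinset, PySem.Set.mem_ofList]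
    have h1 : (PySem.Set.ofList t).toFinset.card = (PySem.Set.ofList t).length :=
      List.toFinset_card_of_nodup (PySem.Set.nodup_ofList t)
    have h2 : t.toFinset.card = t.length := by rw [← hfs, h1, h]
    rw [List.card_toFinset] at h2
    exact List.dedup_eq_self.1 ((t.dedup_sublist).eq_of_length h2)
  · intro h
    rw [PySem.Set.ofList_eq_self_of_nodup t h]

theorem pvLoopB_spec (elements : List Int) (hb : 0 < elements.length) (L : Nat) :
    ∀ (fuel k : Nat) (res : List Int) (cnt : Nat),
    k < elements.length ^ L → elements.length ^ L = k + fuel → res.length = L →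
    pvLoopB elements (L : Int) (elements.length : Int) fuel (pvDigitsI elements.length L k) res cnt
      = (pvVals elements L (elements.length ^ L - 1),
         cnt + (List.range' k fuel).countP (fun m => decide (pvVals elements L m).Nodup)) := by
  intro fuel
  induction fuel with
  | zero => intro k res cnt hk hfe hres; omega
  | succ fuel ih =>
      intro k res cnt hk hfe hres
      have hfill : (PySem.List.pyRange 0 ((L : Nat) : Int) 1).foldl
          (pvFillB elements (pvDigitsI elements.length L k)) res = pvVals elements L k := by
        have h0 := pvFill_spec elements L k [] res (by omega)
        rw [List.append_nil] at h0
        rw [h0, ← hres, List.drop_length, List.append_nil]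
      have hl := pvVals_length elements L k
      have hcond : ((((PySem.Set.ofList (pvVals elements L k)).length : Nat) : Int) = ((L : Nat) : Int))
          ↔ (pvVals elements L k).Nodup := by
        constructor
        · intro h
          exact (pvOfList_len_iff _).1 (by rw [hl]; exact_mod_cast h)
        · intro h
          rw [(pvOfList_len_iff _).2 h, hl]
      simp only [pvLoopB, hfill, Int.toNat_natCast]
      by_cases hend : k + 1 = elements.length ^ L
      · have hfuel : fuel = 0 := by omega
        have hk1 : k = elements.length ^ L - 1 := by omega
        rw [(pvCarry_spec elements.length hb L k hk).1 hend]
        subst hfuel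
        subst hk1
        simp only [if_pos (by norm_num : (-1 : Int) < 0)]
        rw [List.range'_one]
        by_cases hnd : (pvVals elements L (elements.length ^ L - 1)).Nodup
        · rw [if_pos (hcond.2 hnd)]
          simp [hnd]
        · rw [if_neg (fun hc => hnd (hcond.1 hc))]
          simp [hnd]
      · have hlt : k + 1 < elements.length ^ L := by omega
        obtain ⟨d', i, heq, hi, hset⟩ := (pvCarry_spec elements.length hb L k hk).2 hlt
        rw [heq]
        simp only [if_neg (by omega : ¬ ((i : Nat) : Int) < 0), Int.toNat_natCast, hset]
        rw [ih (k + 1) (pvVals elements L k) _ hlt (by omega) (pvVals_length elements L k)]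
        rw [List.range'_succ, List.countP_cons]
        by_cases hnd : (pvVals elements L k).Nodup
        · rw [if_pos (hcond.2 hnd)]
          refine Prod.ext_iff.2 ⟨rfl, ?_⟩
          simp only [hnd, decide_true, if_true]
          omega
        · rw [if_neg (fun hc => hnd (hcond.1 hc))]
          refine Prod.ext_iff.2 ⟨rfl, ?_⟩
          simp only [hnd, decide_false, Bool.false_eq_true, if_false]
          omega

theorem pvMain (elements : List Int) (length : Int) (hpre : 0 ≤ length) :
    permutations_generater elements length = permutations_generater_alt elements length := by
  obtain ⟨L, rfl⟩ := Int.eq_ofNat_of_zero_le hpre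
  have htn : ((L : Int)).toNat = L := Int.toNat_natCast L
  rcases Nat.eq_zero_or_pos elements.length with hb0 | hb
  · -- no elements: A's range is empty for L > 0; for L = 0 both yield the empty tuple once
    have helem : elements = [] := List.length_eq_zero_iff.1 hb0
    subst helem
    rcases Nat.eq_zero_or_pos L with hL | hL
    · subst hL
      decide
    · unfold permutations_generater permutations_generater_alt
      rw [htn, if_pos ⟨by exact_mod_cast hL, rfl⟩]
      have hz : ((List.length ([] : List Int) : Int)) ^ L = ((0 : Nat) : Int) := by
        simp [zero_pow (by omega : L ≠ 0)]
      rw [hz, PySem.List.pyRange_zero_natCast]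
      simp
  · -- at least one element
    unfold permutations_generater permutations_generater_alt
    rw [htn]
    have hcast : ((elements.length : Int) ^ L) = ((elements.length ^ L : Nat) : Int) := by
      push_cast; ring
    rw [hcast, PySem.List.pyRange_zero_natCast,
      pvOuter_spec elements L (List.range (elements.length ^ L)) (List.replicate L 0)
        List.length_replicate 0]
    have hNpos : 0 < elements.length ^ L := pow_pos hb L
    have hlast : ((List.range (elements.length ^ L)).map (pvVals elements L)).getLastD
          (List.replicate L 0) = pvVals elements L (elements.length ^ L - 1) := by
      rw [(Nat.succ_pred_eq_of_pos hNpos).symm, List.range_succ, List.map_append]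
      simp
    rw [hlast, if_neg (fun hcon => (by omega : ¬ elements.length = 0) hcon.2),
      ← pvDigitsI_zero elements.length L,
      pvLoopB_spec elements hb L (elements.length ^ L) 0 _ 0 hNpos (by omega)
        (pvDigitsI_length _ _ _),
      ← List.range_eq_range']

-- ===== VERDICT (by name: the statement is the Claim_ definition above) =====
theorem permutations_generater_spec : Claim_equal_permutations_generater := by
  intro elements length _hdom hpre
  unfold Spec_permutations_generater
  exact pvMain elements length hpre
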